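-- pv_equiv track=rewrite | github.com/Mow910/MamieHenriette | webapp/patreon.py | _parse_mention_config
-- ===== SOURCE A (Python) =====
-- def _parse_mention_config(raw: str | None) -> tuple[bool, bool, list[str]]:
-- 	everyone, here, role_ids = False, False, []
-- 	if not raw or not str(raw).strip():
-- 		return (everyone, here, role_ids)
-- 	for part in str(raw).strip().split(","):
-- 		part = part.strip()
-- 		if part == "everyone":
-- 			everyone = True
-- 		elif part == "here":
-- 			here = True
-- 		elif part.isdigit():
-- 			role_ids.append(part)
-- 	return (everyone, here, role_ids)
-- ===== SOURCE B (Python) =====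
-- def _parse_mention_config(raw: str | None) -> tuple[bool, bool, list[str]]:
-- 	# Character-level streaming scanner: no split(); tokens are classified on the
-- 	# fly as their terminating comma (or the sentinel comma) is reached.
-- 	if raw is None:
-- 		return (False, False, [])
-- 	everyone = here = False
-- 	role_ids = []
-- 	buf = []
-- 	for ch in str(raw).strip() + ",":
-- 		if ch == ",":
-- 			tok = "".join(buf).strip()
-- 			buf = []
-- 			if tok == "everyone":
-- 				everyone = True
-- 			elif tok == "here":
-- 				here = True
-- 			elif tok.isdigit():
-- 				role_ids.append(tok)
-- 		else:
-- 			buf.append(ch)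
-- 	return (everyone, here, role_ids)
-- ===== Notes on version B (the rewrite author's own statement) =====
-- stated objective: alternative
-- what changed: Replaced A's strip-then-split tokenization feeding a classification loop with a single character-level streaming scanner that never calls split: it folds over the characters with a token buffer and classifies each token when its terminating comma (or a sentinel comma) is reached.
import Mathlib
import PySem

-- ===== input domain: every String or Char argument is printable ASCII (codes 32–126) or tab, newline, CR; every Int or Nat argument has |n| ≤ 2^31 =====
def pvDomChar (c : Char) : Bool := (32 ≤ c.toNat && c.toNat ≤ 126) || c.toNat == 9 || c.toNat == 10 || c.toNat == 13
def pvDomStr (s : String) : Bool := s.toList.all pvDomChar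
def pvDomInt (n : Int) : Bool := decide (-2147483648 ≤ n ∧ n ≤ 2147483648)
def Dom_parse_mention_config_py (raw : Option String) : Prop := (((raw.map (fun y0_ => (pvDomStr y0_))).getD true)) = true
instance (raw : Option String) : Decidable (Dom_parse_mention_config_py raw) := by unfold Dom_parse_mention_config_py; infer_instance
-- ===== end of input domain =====

-- B replaces A's strip/split tokenization + classification loop by a character-level
-- streaming scanner (token buffer, classify at each comma); alternative algorithm, same cost.


-- ===== PORT A =====
-- A's loop: classify each comma-separated piece, threading (everyone, here, role_ids).
def parseMentionLoopA : List String → Bool × Bool × List String → Bool × Bool × List String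
  | [], st => st
  | p :: rest, (e, h, r) =>
    let p' := PySem.Str.strip p
    if p' = "everyone" then parseMentionLoopA rest (true, h, r)
    else if p' = "here" then parseMentionLoopA rest (e, true, r)
    else if PySem.Str.strIsdigit p' then parseMentionLoopA rest (e, h, r ++ [p'])
    else parseMentionLoopA rest (e, h, r)

def parse_mention_config_py (raw : Option String) : Bool × Bool × List String :=
  match raw with
  | none => (false, false, [])
  | some s =>
    if s = "" ∨ PySem.Str.strip s = "" then (false, false, [])
    else parseMentionLoopA ((PySem.Str.split? (PySem.Str.strip s) ",").getD []) (false, false, [])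

-- ===== PORT B =====
-- B's scanner: fold over the characters of the stripped string plus a sentinel comma,
-- accumulating a token buffer and classifying each token at its terminating comma.
def scanB : List Char → List Char × Bool × Bool × List String → Bool × Bool × List String
  | [], (_, e, h, r) => (e, h, r)
  | c :: rest, (buf, e, h, r) =>
    if c = ',' then
      let tok := PySem.Str.strip (String.ofList buf)
      if tok = "everyone" then scanB rest ([], true, h, r)
      else if tok = "here" then scanB rest ([], e, true, r)
      else if PySem.Str.strIsdigit tok then scanB rest ([], e, h, r ++ [tok])
      else scanB rest ([], e, h, r)
    else scanB rest (buf ++ [c], e, h, r)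

def parse_mention_config_py_alt (raw : Option String) : Bool × Bool × List String :=
  match raw with
  | none => (false, false, [])
  | some s => scanB ((PySem.Str.strip s).toList ++ [',']) ([], false, false, [])

-- ===== PRECONDITION & SPEC =====
def Spec_parse_mention_config_py (raw : Option String) (out : Bool × Bool × List String) : Prop := out = parse_mention_config_py_alt raw
instance (raw : Option String) (out : Bool × Bool × List String) : Decidable (Spec_parse_mention_config_py raw out) := by unfold Spec_parse_mention_config_py; infer_instance

-- ===== CLAIM (what is proved, stated in full; the proofs are below) =====
def Claim_equal_parse_mention_config_py : Prop := ∀ (raw : Option String), Dom_parse_mention_config_py raw → Spec_parse_mention_config_py raw (parse_mention_config_py raw)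

-- ===== LEMMAS AND PROOFS =====
-- Reference comma-split used to relate both ports (proof-side only).
def mySplit : List Char → List Char → List (List Char)
  | buf, [] => [buf]
  | buf, c :: rest => if c = ',' then buf :: mySplit [] rest else mySplit (buf ++ [c]) rest

lemma splitOn_go_spec : ∀ (fuel : Nat) (l : List Char), l.length < fuel →
    ∀ (cur : List Char) (acc : List (List Char)),
    PySem.Chars.splitOn.go [','] fuel l cur acc = acc.reverse ++ mySplit cur.reverse l := by
  intro fuel
  induction fuel with
  | zero => intro l hl; omega
  | succ f ih =>
    intro l hl cur acc
    cases l with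
    | nil => simp [PySem.Chars.splitOn.go, mySplit]
    | cons c rest =>
      by_cases hc : c = ','
      · subst hc
        simp [PySem.Chars.splitOn.go, mySplit, List.isPrefixOf,
              ih rest (by simpa using Nat.lt_of_succ_lt_succ hl) [] (cur.reverse :: acc)]
      · have hpre : List.isPrefixOf [','] (c :: rest) = false := by
          simp [List.isPrefixOf]; exact fun h => absurd h.symm hc
        simp [PySem.Chars.splitOn.go, hpre, mySplit, hc,
              ih rest (by simpa using Nat.lt_of_succ_lt_succ hl) (c :: cur) acc]

lemma splitOn_eq_mySplit (l : List Char) :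
    PySem.Chars.splitOn l [','] = mySplit [] l := by
  unfold PySem.Chars.splitOn
  simpa using splitOn_go_spec (l.length + 1) l (by omega) [] []

lemma scanB_eq : ∀ (l buf : List Char) (e h : Bool) (r : List String),
    scanB (l ++ [',']) (buf, e, h, r) =
      parseMentionLoopA ((mySplit buf l).map String.ofList) (e, h, r) := by
  intro l
  induction l with
  | nil =>
    intro buf e h r
    simp only [List.nil_append, scanB, mySplit, List.map_cons, List.map_nil, parseMentionLoopA]
    split_ifs <;> simp [parseMentionLoopA]
  | cons c rest ih =>
    intro buf e h r
    by_cases hc : c = ','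
    · subst hc
      simp only [List.cons_append, scanB, mySplit, List.map_cons, parseMentionLoopA, if_pos]
      by_cases h1 : PySem.Str.strip (String.ofList buf) = "everyone"
      · simp [ih]
      · by_cases h2 : PySem.Str.strip (String.ofList buf) = "here"
        · simp [h2, ih]
        · by_cases h3 : PySem.Chars.strIsdigit (PySem.Chars.strip buf) = true
          · simp [h3, ih, PySem.Str.strIsdigit, PySem.Str.strip]
          · simp [h3, ih, PySem.Str.strIsdigit, PySem.Str.strip]
    · simp [scanB, hc, mySplit, ih]

-- ===== VERDICT (by name: the statement is the Claim_ definition above) =====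
theorem parse_mention_config_py_spec : Claim_equal_parse_mention_config_py := by
  intro raw _
  unfold Spec_parse_mention_config_py parse_mention_config_py parse_mention_config_py_alt
  match raw with
  | none => rfl
  | some s =>
    have hsplit : ((PySem.Str.split? (PySem.Str.strip s) ",").getD []) =
        (mySplit [] (PySem.Str.strip s).toList).map String.ofList := by
      simp [PySem.Str.split?, PySem.Chars.split?, splitOn_eq_mySplit, PySem.Str.strip]
    by_cases hs : s = "" ∨ PySem.Str.strip s = ""
    · have hstrip : PySem.Str.strip s = "" := by
        rcases hs with h | h
        · subst h; decide
        · exact h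
      simp [hstrip]
      decide
    · simp [hs, hsplit, scanB_eq]
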